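-- pv_equiv track=rewrite | github.com/davarezza/python-basic | Latihan 5/sales_analysis.py | cari_tertinggi_terendah
-- ===== SOURCE A (Python) =====
-- def cari_tertinggi_terendah(penjualan, produk, bulan):
--     info_penjualan = {}
--     for i in range(len(penjualan)):
--         data = penjualan[i]
--         tertinggi = max(data)
--         terendah = min(data)
--         bulan_tertinggi = bulan[data.index(tertinggi)]
--         bulan_terendah = bulan[data.index(terendah)]
--
--         info_penjualan[produk[i]] = {
--             "Penjualan Tertinggi": (bulan_tertinggi, tertinggi),
--             "Penjualan Terendah": (bulan_terendah, terendah)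
--         }
--     return info_penjualan
-- ===== SOURCE B (Python) =====
-- def cari_tertinggi_terendah(penjualan, produk, bulan):
--     info = {}
--     for nama, data in zip(produk, penjualan):
--         hi = lo = data[0]
--         hi_i = lo_i = 0
--         for j in range(1, len(data)):
--             v = data[j]
--             if v > hi:
--                 hi, hi_i = v, j
--             if v < lo:
--                 lo, lo_i = v, j
--         info[nama] = {
--             "Penjualan Tertinggi": (bulan[hi_i], hi),
--             "Penjualan Terendah": (bulan[lo_i], lo),
--         }
--     return info
-- ===== Notes on version B (the rewrite author's own statement) =====
-- stated objective: alternative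
-- what changed: Replaces A's four separate passes per row (max, min, and two .index scans) by a single explicit scan that maintains the running maximum/minimum and their first indices (strict comparisons keep the first occurrence), and iterates rows with zip(produk, penjualan) instead of indexing by range(len(penjualan)).
import Mathlib
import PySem

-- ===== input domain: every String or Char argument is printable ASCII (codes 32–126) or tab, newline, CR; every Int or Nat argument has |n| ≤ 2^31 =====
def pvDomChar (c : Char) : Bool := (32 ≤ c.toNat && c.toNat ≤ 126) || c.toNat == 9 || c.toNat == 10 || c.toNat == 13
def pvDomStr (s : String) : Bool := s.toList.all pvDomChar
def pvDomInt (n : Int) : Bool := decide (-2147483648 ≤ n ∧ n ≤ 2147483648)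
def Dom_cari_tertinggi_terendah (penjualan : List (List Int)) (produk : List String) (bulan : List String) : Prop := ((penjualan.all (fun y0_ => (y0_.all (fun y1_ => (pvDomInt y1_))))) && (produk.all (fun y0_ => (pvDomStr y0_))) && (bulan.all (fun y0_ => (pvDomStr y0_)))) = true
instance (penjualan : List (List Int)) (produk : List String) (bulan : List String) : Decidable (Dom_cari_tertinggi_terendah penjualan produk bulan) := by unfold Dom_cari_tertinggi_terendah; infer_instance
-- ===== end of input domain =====

-- B replaces A's four passes per row (max, min, two .index scans) by one explicit scan that
-- maintains the running extrema and their first indices, iterating rows with zip instead of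
-- indexing; same asymptotic cost, different decomposition (objective: alternative).

-- ===== PORT A =====
def cari_tertinggi_terendah (penjualan : List (List Int)) (produk : List String) (bulan : List String) : List (String × List (String × String × Int)) :=
  ((PySem.List.pyRange 0 (PySem.List.len penjualan) 1).foldl
    (fun info i =>
      let data := PySem.List.pyGetD penjualan i []
      let tertinggi := (PySem.List.max? data (fun y => y)).getD 0
      let terendah := (PySem.List.min? data (fun y => y)).getD 0
      let bulan_tertinggi := PySem.List.pyGetD bulan (((PySem.List.index? data tertinggi).getD 0 : Nat) : Int) ""
      let bulan_terendah := PySem.List.pyGetD bulan (((PySem.List.index? data terendah).getD 0 : Nat) : Int) ""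
      info.insert (PySem.List.pyGetD produk i "")
        [("Penjualan Tertinggi", (bulan_tertinggi, tertinggi)),
         ("Penjualan Terendah", (bulan_terendah, terendah))])
    (PySem.Dict.empty : PySem.Dict String (List (String × String × Int)))).items

-- ===== PORT B =====
def cari_tertinggi_terendah_alt (penjualan : List (List Int)) (produk : List String) (bulan : List String) : List (String × List (String × String × Int)) :=
  ((produk.zip penjualan).foldl
    (fun info p =>
      let nama := p.1
      let data := p.2
      let v0 := PySem.List.pyGetD data 0 0
      let st := (PySem.List.pyRange 1 (PySem.List.len data) 1).foldl
        (fun st j =>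
          let v := PySem.List.pyGetD data j 0
          let st1 := if st.1 < v then (v, j, st.2.2) else st
          if v < st1.2.2.1 then (st1.1, st1.2.1, v, j) else st1)
        (v0, 0, v0, 0)
      info.insert nama
        [("Penjualan Tertinggi", (PySem.List.pyGetD bulan st.2.1 "", st.1)),
         ("Penjualan Terendah", (PySem.List.pyGetD bulan st.2.2.2 "", st.2.2.1))])
    (PySem.Dict.empty : PySem.Dict String (List (String × String × Int)))).items

-- ===== PRECONDITION & SPEC =====
-- helpers for Pre_ (PySem only, no port code): A's per-row extrema and first-occurrence indices
def pvMaxOf (data : List Int) : Int := (PySem.List.max? data (fun y => y)).getD 0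
def pvMinOf (data : List Int) : Int := (PySem.List.min? data (fun y => y)).getD 0
def pvHiIdx (data : List Int) : Nat := (PySem.List.index? data (pvMaxOf data)).getD 0
def pvLoIdx (data : List Int) : Nat := (PySem.List.index? data (pvMinOf data)).getD 0

-- A raises (ValueError on max/min of an empty row, IndexError on produk[i] or bulan[..]) exactly
-- outside these conditions; Pre_ is the exact domain on which the Python A returns.
def Pre_cari_tertinggi_terendah (penjualan : List (List Int)) (produk : List String) (bulan : List String) : Prop :=
  penjualan.length ≤ produk.length ∧
  ∀ data ∈ penjualan, data ≠ [] ∧ pvHiIdx data < bulan.length ∧ pvLoIdx data < bulan.length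
instance (penjualan : List (List Int)) (produk : List String) (bulan : List String) : Decidable (Pre_cari_tertinggi_terendah penjualan produk bulan) := by unfold Pre_cari_tertinggi_terendah; infer_instance

def pvWitness_cari_tertinggi_terendah : List (List Int) × List String × List String :=
  ([[3, 1, 2]], ["A"], ["Jan", "Feb", "Mar"])

def Spec_cari_tertinggi_terendah (penjualan : List (List Int)) (produk : List String) (bulan : List String) (out : List (String × List (String × String × Int))) : Prop := out = cari_tertinggi_terendah_alt penjualan produk bulan
instance (penjualan : List (List Int)) (produk : List String) (bulan : List String) (out : List (String × List (String × String × Int))) : Decidable (Spec_cari_tertinggi_terendah penjualan produk bulan out) := by unfold Spec_cari_tertinggi_terendah; infer_instance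

-- ===== CLAIM (what is proved, stated in full; the proofs are below) =====
def Claim_equal_cari_tertinggi_terendah : Prop := ∀ (penjualan : List (List Int)) (produk : List String) (bulan : List String), Dom_cari_tertinggi_terendah penjualan produk bulan → Pre_cari_tertinggi_terendah penjualan produk bulan → Spec_cari_tertinggi_terendah penjualan produk bulan (cari_tertinggi_terendah penjualan produk bulan)

-- ===== LEMMAS AND PROOFS =====
-- the 4-tuple A effectively computes for one row (value/first index of max, then of min)
def rowSt (data : List Int) : Int × Int × Int × Int :=
  (pvMaxOf data, (pvHiIdx data : Int), pvMinOf data, (pvLoIdx data : Int))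

theorem pvMaxOf_cons (x : Int) (t : List Int) : pvMaxOf (x :: t) = t.foldl max x := by
  simp [pvMaxOf, PySem.List.max?_id_cons]

theorem pvMinOf_cons (x : Int) (t : List Int) : pvMinOf (x :: t) = t.foldl min x := by
  simp [pvMinOf, PySem.List.min?_id_cons]

theorem pvMinOf_le_pvMaxOf (data : List Int) (h : data ≠ []) : pvMinOf data ≤ pvMaxOf data := by
  obtain ⟨x, t, rfl⟩ := List.exists_cons_of_ne_nil h
  rw [pvMaxOf_cons, pvMinOf_cons]
  calc t.foldl min x ≤ x := (PySem.List.foldl_min_le t x).1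
    _ ≤ t.foldl max x := (PySem.List.le_foldl_max t x).1

theorem pvMaxOf_mem (data : List Int) (h : data ≠ []) : pvMaxOf data ∈ data := by
  obtain ⟨x, t, rfl⟩ := List.exists_cons_of_ne_nil h
  rw [pvMaxOf_cons]
  rcases PySem.List.foldl_max_mem t x with h' | h'
  · rw [h']; exact List.mem_cons_self
  · exact List.mem_cons_of_mem _ h'

theorem pvMinOf_mem (data : List Int) (h : data ≠ []) : pvMinOf data ∈ data := by
  obtain ⟨x, t, rfl⟩ := List.exists_cons_of_ne_nil h
  rw [pvMinOf_cons]
  rcases PySem.List.foldl_min_mem t x with h' | h'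
  · rw [h']; exact List.mem_cons_self
  · exact List.mem_cons_of_mem _ h'

theorem le_pvMaxOf (data : List Int) (h : data ≠ []) : ∀ y ∈ data, y ≤ pvMaxOf data := by
  obtain ⟨x, t, rfl⟩ := List.exists_cons_of_ne_nil h
  rw [pvMaxOf_cons]
  intro y hy
  rcases List.mem_cons.mp hy with rfl | hy
  · exact (PySem.List.le_foldl_max t y).1
  · exact (PySem.List.le_foldl_max t x).2 y hy

theorem pvMinOf_le (data : List Int) (h : data ≠ []) : ∀ y ∈ data, pvMinOf data ≤ y := by
  obtain ⟨x, t, rfl⟩ := List.exists_cons_of_ne_nil h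
  rw [pvMinOf_cons]
  intro y hy
  rcases List.mem_cons.mp hy with rfl | hy
  · exact (PySem.List.foldl_min_le t y).1
  · exact (PySem.List.foldl_min_le t x).2 y hy
theorem pvMaxOf_append_singleton (pre : List Int) (w : Int) (h : pre ≠ []) :
    pvMaxOf (pre ++ [w]) = max (pvMaxOf pre) w := by
  obtain ⟨x, t, rfl⟩ := List.exists_cons_of_ne_nil h
  rw [pvMaxOf_cons]
  rw [show (x :: t) ++ [w] = x :: (t ++ [w]) by rfl, pvMaxOf_cons, List.foldl_append]
  simp

theorem pvMinOf_append_singleton (pre : List Int) (w : Int) (h : pre ≠ []) :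
    pvMinOf (pre ++ [w]) = min (pvMinOf pre) w := by
  obtain ⟨x, t, rfl⟩ := List.exists_cons_of_ne_nil h
  rw [pvMinOf_cons]
  rw [show (x :: t) ++ [w] = x :: (t ++ [w]) by rfl, pvMinOf_cons, List.foldl_append]
  simp

theorem pvHiIdx_append_gt (pre : List Int) (w : Int) (hpre : pre ≠ []) (h : pvMaxOf pre < w) :
    pvHiIdx (pre ++ [w]) = pre.length ∧ pvMaxOf (pre ++ [w]) = w := by
  have hw : w ∉ pre := fun hm => absurd (le_pvMaxOf pre hpre w hm) (by omega)
  have hM : pvMaxOf (pre ++ [w]) = w := by rw [pvMaxOf_append_singleton pre w hpre]; omega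
  refine ⟨?_, hM⟩
  rw [pvHiIdx, hM, PySem.List.index?_append_singleton_self pre w hw]
  rfl

theorem pvHiIdx_append_le (pre : List Int) (w : Int) (hpre : pre ≠ []) (h : w ≤ pvMaxOf pre) :
    pvHiIdx (pre ++ [w]) = pvHiIdx pre ∧ pvMaxOf (pre ++ [w]) = pvMaxOf pre := by
  have hM : pvMaxOf (pre ++ [w]) = pvMaxOf pre := by rw [pvMaxOf_append_singleton pre w hpre]; omega
  refine ⟨?_, hM⟩
  rw [pvHiIdx, hM, PySem.List.index?_append_of_mem _ (pvMaxOf_mem pre hpre)]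
  rfl

theorem pvLoIdx_append_lt (pre : List Int) (w : Int) (hpre : pre ≠ []) (h : w < pvMinOf pre) :
    pvLoIdx (pre ++ [w]) = pre.length ∧ pvMinOf (pre ++ [w]) = w := by
  have hw : w ∉ pre := fun hm => absurd (pvMinOf_le pre hpre w hm) (by omega)
  have hM : pvMinOf (pre ++ [w]) = w := by rw [pvMinOf_append_singleton pre w hpre]; omega
  refine ⟨?_, hM⟩
  rw [pvLoIdx, hM, PySem.List.index?_append_singleton_self pre w hw]
  rfl

theorem pvLoIdx_append_le (pre : List Int) (w : Int) (hpre : pre ≠ []) (h : pvMinOf pre ≤ w) :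
    pvLoIdx (pre ++ [w]) = pvLoIdx pre ∧ pvMinOf (pre ++ [w]) = pvMinOf pre := by
  have hM : pvMinOf (pre ++ [w]) = pvMinOf pre := by rw [pvMinOf_append_singleton pre w hpre]; omega
  refine ⟨?_, hM⟩
  rw [pvLoIdx, hM, PySem.List.index?_append_of_mem _ (pvMinOf_mem pre hpre)]
  rfl

theorem rowSt_step (pre : List Int) (w : Int) (hpre : pre ≠ []) :
    (let st := rowSt pre
     let st1 := if st.1 < w then (w, (pre.length : Int), st.2.2) else st
     if w < st1.2.2.1 then (st1.1, st1.2.1, w, (pre.length : Int)) else st1)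
    = rowSt (pre ++ [w]) := by
  have hmle := pvMinOf_le_pvMaxOf pre hpre
  simp only [rowSt]
  by_cases hgt : pvMaxOf pre < w
  · obtain ⟨hI, hM⟩ := pvHiIdx_append_gt pre w hpre hgt
    obtain ⟨hJ, hm⟩ := pvLoIdx_append_le pre w hpre (by omega)
    simp only [if_pos hgt]
    rw [if_neg (show ¬ w < pvMinOf pre by omega)]
    simp [hI, hM, hJ, hm]
  · obtain ⟨hI, hM⟩ := pvHiIdx_append_le pre w hpre (by omega)
    simp only [if_neg hgt]
    by_cases hlt : w < pvMinOf pre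
    · obtain ⟨hJ, hm⟩ := pvLoIdx_append_lt pre w hpre hlt
      rw [if_pos hlt]
      simp [hI, hM, hJ, hm]
    · obtain ⟨hJ, hm⟩ := pvLoIdx_append_le pre w hpre (by omega)
      rw [if_neg hlt]
      simp [hI, hM, hJ, hm]

theorem rowSt_scan (rest : List Int) : ∀ (pre : List Int), pre ≠ [] →
    (PySem.List.enumerate rest (pre.length : Int)).foldl
      (fun st p =>
        let v := p.2
        let st1 := if st.1 < v then (v, p.1, st.2.2) else st
        if v < st1.2.2.1 then (st1.1, st1.2.1, v, p.1) else st1)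
      (rowSt pre) = rowSt (pre ++ rest) := by
  induction rest with
  | nil => intro pre h; simp [PySem.List.enumerate]
  | cons w rest ih =>
    intro pre hpre
    rw [PySem.List.enumerate_cons, List.foldl_cons]
    have e1 : (let v := (((pre.length : Int), w) : Int × Int).2
        let st1 := if (rowSt pre).1 < v then (v, (((pre.length : Int), w) : Int × Int).1, (rowSt pre).2.2) else rowSt pre
        if v < st1.2.2.1 then (st1.1, st1.2.1, v, (((pre.length : Int), w) : Int × Int).1) else st1)
        = rowSt (pre ++ [w]) := rowSt_step pre w hpre
    rw [e1]
    have hlen : (pre.length : Int) + 1 = ((pre ++ [w]).length : Int) := by simp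
    rw [hlen]
    have := ih (pre ++ [w]) (by simp)
    rw [this]
    simp

theorem scan_enumerate (v : Int) (rest : List Int)
    (F : (Int × Int × Int × Int) → Int → Int → (Int × Int × Int × Int)) (init : Int × Int × Int × Int) :
    (PySem.List.pyRange 1 (PySem.List.len (v :: rest)) 1).foldl
      (fun st j => F st j (PySem.List.pyGetD (v :: rest) j 0)) init
    = (PySem.List.enumerate rest 1).foldl (fun st p => F st p.1 p.2) init := by
  have hl : PySem.List.len (v :: rest) = 1 + (rest.length : Int) := by
    simp [PySem.List.len]; omega
  rw [hl, ← PySem.List.map_fst_enumerate rest 1, List.foldl_map]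
  apply PySem.List.foldl_congr_mem
  intro acc p hp
  obtain ⟨k, hk, rfl⟩ := (PySem.List.mem_enumerate_iff rest 1 p).mp hp
  have : PySem.List.pyGetD (v :: rest) (1 + (k : Int)) 0 = rest[k] := by
    rw [show (1 + (k : Int)) = ((k + 1 : Nat) : Int) by push_cast; ring, PySem.List.pyGetD_natCast]
    simp [List.getD_eq_getElem?_getD, hk]
  rw [this]

theorem foldl_range_eq_zip {β : Type} : ∀ (pj : List (List Int)) (pr : List String)
    (f : β → List Int → String → β) (d : β), pj.length ≤ pr.length →
    (PySem.List.pyRange 0 (PySem.List.len pj) 1).foldl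
      (fun acc i => f acc (PySem.List.pyGetD pj i []) (PySem.List.pyGetD pr i "")) d
    = (pr.zip pj).foldl (fun acc p => f acc p.2 p.1) d := by
  intro pj
  induction pj with
  | nil => intro pr f d h; simp [PySem.List.len, PySem.List.pyRange_one_eq_nil]
  | cons x xs ih =>
    intro pr f d h
    cases pr with
    | nil => simp at h
    | cons y ys =>
      have hl : PySem.List.len (x :: xs) = 0 + ((xs.length + 1 : Nat) : Int) := by
        simp [PySem.List.len]
      rw [hl, PySem.List.pyRange_one_cons (by push_cast; omega), List.foldl_cons]
      have e0 : PySem.List.pyGetD (x :: xs) 0 [] = x := by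
        rw [show (0 : Int) = ((0 : Nat) : Int) from rfl, PySem.List.pyGetD_natCast]; rfl
      have e0' : PySem.List.pyGetD (y :: ys) 0 "" = y := by
        rw [show (0 : Int) = ((0 : Nat) : Int) from rfl, PySem.List.pyGetD_natCast]; rfl
      rw [e0, e0']
      have hshift : (PySem.List.pyRange (0+1) (0 + ((xs.length + 1 : Nat) : Int)) 1).foldl
          (fun acc i => f acc (PySem.List.pyGetD (x :: xs) i []) (PySem.List.pyGetD (y :: ys) i "")) (f d x y)
          = (PySem.List.pyRange 0 (PySem.List.len xs) 1).foldl
          (fun acc i => f acc (PySem.List.pyGetD xs i []) (PySem.List.pyGetD ys i "")) (f d x y) := by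
        rw [PySem.List.pyRange_one (0+1), PySem.List.pyRange_one 0, List.foldl_map, List.foldl_map]
        have hn : ((0 + ((xs.length + 1 : Nat) : Int)) - (0+1)).toNat = xs.length := by omega
        have hn2 : (PySem.List.len xs - 0).toNat = xs.length := by simp [PySem.List.len]
        rw [hn, hn2]
        apply PySem.List.foldl_congr_mem
        intro acc k hk
        have hk' : k < xs.length := List.mem_range.mp hk
        have c1 : (0 + 1 + (k : Int)) = ((k + 1 : Nat) : Int) := by push_cast; ring
        have c2 : ((0 : Int) + (k : Int)) = ((k : Nat) : Int) := by ring
        rw [c1, c2, PySem.List.pyGetD_natCast, PySem.List.pyGetD_natCast,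
            PySem.List.pyGetD_natCast, PySem.List.pyGetD_natCast]
        rfl
      rw [hshift, ih ys f (f d x y) (by simpa using h)]
      rfl

theorem rowSt_singleton (v : Int) : rowSt [v] = (v, 0, v, 0) := by
  simp [rowSt, pvMaxOf, pvMinOf, pvHiIdx, pvLoIdx, PySem.List.max?, PySem.List.min?]

theorem scan_eq (data : List Int) (h : data ≠ []) :
    (PySem.List.pyRange 1 (PySem.List.len data) 1).foldl
      (fun st j =>
        let v := PySem.List.pyGetD data j 0
        let st1 := if st.1 < v then (v, j, st.2.2) else st
        if v < st1.2.2.1 then (st1.1, st1.2.1, v, j) else st1)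
      (PySem.List.pyGetD data 0 0, 0, PySem.List.pyGetD data 0 0, 0)
    = rowSt data := by
  obtain ⟨v, rest, rfl⟩ := List.exists_cons_of_ne_nil h
  have h0 : PySem.List.pyGetD (v :: rest) 0 0 = v := by
    rw [show (0 : Int) = ((0 : Nat) : Int) from rfl, PySem.List.pyGetD_natCast]; rfl
  rw [h0]
  rw [scan_enumerate v rest (fun st j w =>
        let st1 := if st.1 < w then (w, j, st.2.2) else st
        if w < st1.2.2.1 then (st1.1, st1.2.1, w, j) else st1) (v, 0, v, 0)]
  have := rowSt_scan rest [v] (by simp)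
  rw [rowSt_singleton, List.singleton_append] at this
  exact this

theorem ports_eq (penjualan : List (List Int)) (produk : List String) (bulan : List String)
    (hlen : penjualan.length ≤ produk.length)
    (hrows : ∀ data ∈ penjualan, data ≠ []) :
    cari_tertinggi_terendah penjualan produk bulan = cari_tertinggi_terendah_alt penjualan produk bulan := by
  unfold cari_tertinggi_terendah cari_tertinggi_terendah_alt
  rw [foldl_range_eq_zip penjualan produk
      (fun info data nama =>
        info.insert nama
          [("Penjualan Tertinggi", (PySem.List.pyGetD bulan ((((PySem.List.index? data ((PySem.List.max? data (fun y => y)).getD 0)).getD 0 : Nat)) : Int) "", (PySem.List.max? data (fun y => y)).getD 0)),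
           ("Penjualan Terendah", (PySem.List.pyGetD bulan ((((PySem.List.index? data ((PySem.List.min? data (fun y => y)).getD 0)).getD 0 : Nat)) : Int) "", (PySem.List.min? data (fun y => y)).getD 0))])
      PySem.Dict.empty hlen]
  congr 1
  apply PySem.List.foldl_congr_mem
  intro info p hp
  have hdata : p.2 ∈ penjualan := (List.of_mem_zip hp).2
  have hne : p.2 ≠ [] := hrows p.2 hdata
  have hs := scan_eq p.2 hne
  simp only
  rw [hs]
  rfl

-- ===== VERDICT (by name: the statement is the Claim_ definition above) =====
theorem cari_tertinggi_terendah_spec : Claim_equal_cari_tertinggi_terendah := by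
  intro penjualan produk bulan _ hp
  unfold Spec_cari_tertinggi_terendah
  exact ports_eq penjualan produk bulan hp.1 (fun d hd => (hp.2 d hd).1)
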